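-- pv_equiv track=rewrite | github.com/AusarYao/utbm-LO52 | Projet/application/AStar/Tools.py | Sum_pow2
-- ===== SOURCE A (Python) =====
-- def Sum_pow2(n):
-- 		L = [2**i for i in range( 0, n + 1) if 2**i <= n]
-- 		L.reverse()
-- 		S = 0
-- 		L2 = []
-- 		while S < n:
-- 			for i in L:
-- 			    while ( S + i ) <= n:
-- 			        S += i
-- 			        L2.append( i )
-- 			if L == [] :
-- 			    return "N'est pas decomposable en somme de carres d'entiers"
-- 		return L2
-- ===== SOURCE B (Python) =====
-- def Sum_pow2(n):
--     # Binary decomposition: collect set bits ascending, then reverse. O(log n).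
--     bits = []
--     p = 1
--     r = n
--     while p <= n:
--         if r % 2:
--             bits.append(p)
--         r //= 2
--         p *= 2
--     bits.reverse()
--     return bits
-- ===== Notes on version B (the rewrite author's own statement) =====
-- stated objective: faster
-- what changed: Replaces the linear range scan that builds every candidate power plus a greedy subtraction loop with a single logarithmic pass that extracts the set bits of n via parity test and halving, then reverses.
import Mathlib
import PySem

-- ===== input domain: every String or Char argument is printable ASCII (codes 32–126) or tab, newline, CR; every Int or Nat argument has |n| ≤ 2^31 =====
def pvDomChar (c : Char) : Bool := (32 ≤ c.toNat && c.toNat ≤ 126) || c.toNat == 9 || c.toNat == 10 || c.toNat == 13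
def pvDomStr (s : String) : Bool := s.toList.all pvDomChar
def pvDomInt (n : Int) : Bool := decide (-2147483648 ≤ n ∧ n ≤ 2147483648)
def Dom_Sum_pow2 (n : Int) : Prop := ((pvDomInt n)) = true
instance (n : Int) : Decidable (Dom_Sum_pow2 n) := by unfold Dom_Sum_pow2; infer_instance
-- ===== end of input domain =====

-- B replaces A's O(n) scan of range(0, n+1) plus greedy subtraction by an O(log n)
-- extraction of the set bits of n (% 2 / // 2), reversed at the end (objective: faster).

-- ===== PORT A =====
-- inner 'while (S + i) <= n: S += i; L2.append(i)'; fuel makes the loop total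
-- (the callers always pass enough fuel for the Python behaviour: i is a positive power of 2)
def pyInnerA (n i : Int) : Nat → Int → List Int → Int × List Int
  | 0, S, L2 => (S, L2)
  | f+1, S, L2 => if S + i ≤ n then pyInnerA n i f (S + i) (L2 ++ [i]) else (S, L2)

-- 'for i in L: while …'
def pyForA (n : Int) (L : List Int) (S : Int) (L2 : List Int) : Int × List Int :=
  L.foldl (fun p i => pyInnerA n i ((n - p.1).toNat + 1) p.1 p.2) (S, L2)

-- outer 'while S < n'; the 'if L == []' branch returns a French error STRING in the
-- Python; it is unreachable for any integer n (L = [] forces n ≤ 0, so S < n fails),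
-- so it is ported as [].
def pyOuterA (n : Int) (L : List Int) : Nat → Int → List Int → List Int
  | 0, _, L2 => L2
  | f+1, S, L2 =>
    if S < n then
      let p := pyForA n L S L2
      if L = [] then []
      else pyOuterA n L f p.1 p.2
    else L2

def Sum_pow2 (n : Int) : List Int :=
  let L := (((PySem.List.pyRange 0 (n+1) 1).filter
              (fun i => decide ((2:Int) ^ i.toNat ≤ n))).map
              (fun i => (2:Int) ^ i.toNat)).reverse
  pyOuterA n L (n.toNat + 1) 0 []

-- ===== PORT B =====
-- 'while p <= n: if r % 2: bits.append(p); r //= 2; p *= 2'; fuel n.toNat+1 covers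
-- the ≤ log2 n + 1 iterations
def bLoop (n : Int) : Nat → Int → Int → List Int → List Int
  | 0, _, _, bits => bits
  | f+1, p, r, bits =>
    if p ≤ n then
      bLoop n f (p * 2) (PySem.Int.floordiv r 2)
        (if PySem.Int.mod r 2 ≠ 0 then bits ++ [p] else bits)
    else bits

def Sum_pow2_alt (n : Int) : List Int := (bLoop n (n.toNat + 1) 1 n []).reverse

-- ===== PRECONDITION & SPEC =====
def Spec_Sum_pow2 (n : Int) (out : List Int) : Prop := out = Sum_pow2_alt n
instance (n : Int) (out : List Int) : Decidable (Spec_Sum_pow2 n out) := by unfold Spec_Sum_pow2; infer_instance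

-- ===== CLAIM (what is proved, stated in full; the proofs are below) =====
def Claim_equal_Sum_pow2 : Prop := ∀ (n : Int), Dom_Sum_pow2 n → Spec_Sum_pow2 n (Sum_pow2 n)

-- ===== LEMMAS AND PROOFS =====

-- the descending list [2^m, 2^(m-1), ..., 1]
def descPows : Nat → List Int
  | 0 => [1]
  | m+1 => 2^(m+1) :: descPows m

-- bits of r (levels 0..m), LSB first, scaled by p
def ascBits : Nat → Int → Int → List Int
  | 0, p, r => if PySem.Int.mod r 2 ≠ 0 then [p] else []
  | m+1, p, r => (if PySem.Int.mod r 2 ≠ 0 then [p] else [])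
      ++ ascBits m (p * 2) (PySem.Int.floordiv r 2)

-- the same bits, MSB first
def descS : Nat → Int → Int → List Int
  | 0, p, r => if PySem.Int.mod r 2 ≠ 0 then [p] else []
  | m+1, p, r => descS m (p * 2) (PySem.Int.floordiv r 2)
      ++ (if PySem.Int.mod r 2 ≠ 0 then [p] else [])

theorem pvTwoPos : (0:Int) < 2 := by norm_num

theorem rev_ascBits (m : Nat) : ∀ (p r : Int), (ascBits m p r).reverse = descS m p r := by
  induction m with
  | zero => intro p r; simp only [ascBits, descS]; split <;> simp
  | succ m ih =>
    intro p r
    simp only [ascBits, descS, List.reverse_append, ih]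
    split <;> simp

theorem descS_zero (m : Nat) : ∀ (p : Int), descS m p 0 = [] := by
  induction m with
  | zero => intro p; simp [descS, PySem.Int.mod_eq_emod_of_pos pvTwoPos]
  | succ m ih =>
    intro p
    simp [descS, PySem.Int.mod_eq_emod_of_pos pvTwoPos,
      PySem.Int.floordiv_eq_ediv_of_pos pvTwoPos, ih]

theorem ascBits_zero (m : Nat) : ∀ (p : Int), ascBits m p 0 = [] := by
  induction m with
  | zero => intro p; simp [ascBits, PySem.Int.mod_eq_emod_of_pos pvTwoPos]
  | succ m ih =>
    intro p
    simp [ascBits, PySem.Int.mod_eq_emod_of_pos pvTwoPos,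
      PySem.Int.floordiv_eq_ediv_of_pos pvTwoPos, ih]

-- MSB-first decomposition of descS
theorem descS_msb (m : Nat) : ∀ (p r : Int), 0 ≤ r → r < 2^(m+1+1) →
    descS (m+1) p r =
      (if 2^(m+1) ≤ r then [2^(m+1) * p] else [])
        ++ descS m p (if 2^(m+1) ≤ r then r - 2^(m+1) else r) := by
  induction m with
  | zero =>
    intro p r h0 h4
    have h4' : r < 4 := by norm_num at h4; omega
    simp only [descS, PySem.Int.floordiv_eq_ediv_of_pos pvTwoPos,
      PySem.Int.mod_eq_emod_of_pos pvTwoPos]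
    have e1 : (2:Int)^(0+1) = 2 := by norm_num
    rw [e1]
    interval_cases r <;> norm_num <;> ring
  | succ m ih =>
    intro p r h0 hlt
    have hb1 : (2:Int)^(m+1+1+1) = 2^(m+1+1) * 2 := pow_succ 2 (m+1+1)
    have hb2 : (2:Int)^(m+1+1) = 2^(m+1) * 2 := pow_succ 2 (m+1)
    have hstep : ∀ r' : Int, descS (m+1+1) p r' = descS (m+1) (p*2) (r' / 2)
        ++ (if r' % 2 ≠ 0 then [p] else []) := by
      intro r'
      simp [descS, PySem.Int.floordiv_eq_ediv_of_pos pvTwoPos,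
        PySem.Int.mod_eq_emod_of_pos pvTwoPos]
    rw [hstep, ih (p*2) (r/2) (by omega) (by omega)]
    have hiff : ((2:Int)^(m+1) ≤ r / 2) ↔ (2:Int)^(m+1+1) ≤ r := by omega
    by_cases hc : (2:Int)^(m+1+1) ≤ r
    · have hc' : (2:Int)^(m+1) ≤ r / 2 := hiff.mpr hc
      simp only [if_pos hc, if_pos hc']
      have e1 : (2:Int)^(m+1) * (p*2) = 2^(m+1+1) * p := by ring
      have e2 : r / 2 - 2^(m+1) = (r - 2^(m+1+1)) / 2 := by omega
      have e3 : (r - 2^(m+1+1)) % 2 = r % 2 := by omega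
      rw [e1, e2]
      rw [show descS (m+1) p (r - 2^(m+1+1)) = descS m (p*2) ((r - 2^(m+1+1)) / 2)
          ++ (if (r - 2^(m+1+1)) % 2 ≠ 0 then [p] else []) from by
        simp [descS, PySem.Int.floordiv_eq_ediv_of_pos pvTwoPos,
          PySem.Int.mod_eq_emod_of_pos pvTwoPos]]
      rw [e3]
      simp
    · have hc' : ¬ ((2:Int)^(m+1) ≤ r / 2) := fun h => hc (hiff.mp h)
      simp only [if_neg hc, if_neg hc']
      rw [show descS (m+1) p r = descS m (p*2) (r / 2)
          ++ (if r % 2 ≠ 0 then [p] else []) from by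
        simp [descS, PySem.Int.floordiv_eq_ediv_of_pos pvTwoPos,
          PySem.Int.mod_eq_emod_of_pos pvTwoPos]]
      simp

-- inner-loop unfoldings
theorem innerA_stop (n i S : Int) (L2 : List Int) (f : Nat) (h : ¬ S + i ≤ n) :
    pyInnerA n i f S L2 = (S, L2) := by
  cases f <;> simp [pyInnerA, h]

theorem innerA_step (n i S : Int) (L2 : List Int) (f : Nat) (h : S + i ≤ n) :
    pyInnerA n i (f+1) S L2 = pyInnerA n i f (S + i) (L2 ++ [i]) := by
  simp [pyInnerA, h]

theorem forA_nil (n S : Int) (L2 : List Int) : pyForA n [] S L2 = (S, L2) := by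
  simp [pyForA]

theorem forA_cons (n i S : Int) (L2 : List Int) (L' : List Int) :
    pyForA n (i :: L') S L2 =
      pyForA n L' (pyInnerA n i ((n - S).toNat + 1) S L2).1
        (pyInnerA n i ((n - S).toNat + 1) S L2).2 := by
  simp [pyForA]

-- A's greedy pass over the full descending power list computes the MSB-first bits
theorem forA_eq (n : Int) : ∀ (m : Nat) (S : Int) (L2 : List Int),
    0 ≤ n - S → n - S < 2^(m+1) →
    pyForA n (descPows m) S L2 = (n, L2 ++ descS m 1 (n - S)) := by
  intro m
  induction m with
  | zero =>
    intro S L2 h0 h2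
    have h2' : n - S < 2 := by norm_num at h2; omega
    rw [show descPows 0 = [1] from rfl, forA_cons]
    by_cases h : S + 1 ≤ n
    · have hin : pyInnerA n 1 ((n - S).toNat + 1) S L2 = (S + 1, L2 ++ [1]) := by
        rw [show (n - S).toNat + 1 = 1 + 1 from by omega, innerA_step _ _ _ _ _ h,
          innerA_stop _ _ _ _ _ (by omega)]
      rw [hin, forA_nil]
      have hd : descS 0 1 (n - S) = [1] := by
        rw [show n - S = 1 from by omega]; decide
      rw [hd]
      have : n = S + 1 := by omega
      simp [this]
    · rw [innerA_stop _ _ _ _ _ h, forA_nil]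
      rw [show n - S = 0 from by omega, descS_zero]
      have : n = S := by omega
      simp [this]
  | succ m ih =>
    intro S L2 h0 hlt
    have hb : (2:Int)^(m+1+1) = 2^(m+1) * 2 := pow_succ 2 (m+1)
    have hpow : (0:Int) < 2^(m+1) := by positivity
    rw [show descPows (m+1) = 2^(m+1) :: descPows m from rfl, forA_cons]
    by_cases h : 2^(m+1) ≤ n - S
    · have hstep : S + 2^(m+1) ≤ n := by omega
      have hin : pyInnerA n (2^(m+1)) ((n - S).toNat + 1) S L2
          = (S + 2^(m+1), L2 ++ [2^(m+1)]) := by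
        rw [show (n - S).toNat + 1 = ((n - S).toNat - 1) + 1 + 1 from by omega,
          innerA_step _ _ _ _ _ hstep,
          innerA_stop _ _ _ _ _ (by omega)]
      rw [hin]
      rw [ih (S + 2^(m+1)) (L2 ++ [2^(m+1)]) (by omega) (by omega)]
      rw [descS_msb m 1 (n - S) h0 hlt]
      rw [show n - (S + 2^(m+1)) = n - S - 2^(m+1) from by ring]
      simp [h]
    · rw [innerA_stop _ _ _ _ _ (by omega)]
      rw [ih S L2 h0 (by omega)]
      rw [descS_msb m 1 (n - S) h0 hlt]
      simp [h]

theorem descPows_ne_nil (m : Nat) : descPows m ≠ [] := by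
  cases m <;> simp [descPows]

-- reverse of the ascending power map is descPows
theorem rev_range_pow (m : Nat) :
    ((List.range (m+1)).map (fun k => (2:Int)^k)).reverse = descPows m := by
  induction m with
  | zero => simp [descPows, List.range_succ]
  | succ m ih =>
    rw [List.range_succ]
    simp only [List.map_append, List.reverse_append]
    simp [descPows, ih]

-- A's power list equals descPows m when 2^m ≤ n < 2^(m+1)
theorem L_eq (n : Int) (m : Nat) (h1 : (2:Int)^m ≤ n) (h2 : n < 2^(m+1)) :
    (((PySem.List.pyRange 0 (n+1) 1).filter
        (fun i => decide ((2:Int) ^ i.toNat ≤ n))).map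
        (fun i => (2:Int) ^ i.toNat)).reverse = descPows m := by
  have hmn : (m:Int) < n := by
    have h := Nat.lt_two_pow_self (n := m)
    have : (m:Int) < 2^m := by exact_mod_cast h
    omega
  rw [PySem.List.pyRange_zero]
  rw [show ((n + 1).toNat) = n.toNat + 1 from by omega]
  have key : ∀ N, m + 1 ≤ N →
      ((List.range N).map (fun (k : Nat) => (k:Int))).filter
        (fun i => decide ((2:Int) ^ i.toNat ≤ n))
      = (List.range (m+1)).map (fun (k : Nat) => (k:Int)) := by
    intro N hmN
    induction N with
    | zero => omega
    | succ N ihN =>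
      by_cases hc : m + 1 ≤ N
      · rw [List.range_succ]
        simp only [List.map_append, List.filter_append, ihN hc]
        have hbig : n < (2:Int)^N := by
          have hmono : (2:Int)^(m+1) ≤ 2^N := pow_le_pow_right₀ (by norm_num) hc
          omega
        simp [not_le, hbig]
      · have hNm : N = m := by omega
        rw [hNm]
        apply List.filter_eq_self.mpr
        intro a ha
        simp only [List.mem_map, List.mem_range] at ha
        obtain ⟨k, hk, rfl⟩ := ha
        rw [Int.toNat_natCast]
        have : (2:Int)^k ≤ 2^m := pow_le_pow_right₀ (by norm_num) (by omega)
        simp only [decide_eq_true_eq]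
        omega
  rw [key (n.toNat + 1) (by omega)]
  rw [← rev_range_pow m]
  congr 1
  rw [List.map_map]
  apply List.map_congr_left
  intro k hk
  simp

-- A's value for 1 ≤ n, with 2^m ≤ n < 2^(m+1)
theorem A_eq (n : Int) (m : Nat) (h1 : (2:Int)^m ≤ n) (h2 : n < 2^(m+1)) :
    Sum_pow2 n = descS m 1 n := by
  have hpow : (0:Int) < 2^m := by positivity
  have hn0 : (0:Int) < n := by omega
  show pyOuterA n _ (n.toNat + 1) 0 [] = _
  rw [L_eq n m h1 h2]
  obtain ⟨k, hk⟩ : ∃ k, n.toNat = k + 1 := ⟨n.toNat - 1, by omega⟩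
  rw [hk]
  rw [show k + 1 + 1 = (k + 1) + 1 from rfl, pyOuterA]
  rw [if_pos hn0]
  have hfor := forA_eq n m 0 [] (by omega) (by omega)
  rw [if_neg (descPows_ne_nil m)]
  simp only [hfor, List.nil_append]
  rw [pyOuterA]
  simp

-- accumulator lemma for B's loop
theorem bLoop_acc (n : Int) : ∀ (f : Nat) (p r : Int) (acc : List Int),
    bLoop n f p r acc = acc ++ bLoop n f p r [] := by
  intro f
  induction f with
  | zero => intro p r acc; simp [bLoop]
  | succ f ih =>
    intro p r acc
    by_cases h : p ≤ n
    · simp only [bLoop, if_pos h]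
      rw [ih (p*2) (PySem.Int.floordiv r 2)
            (if PySem.Int.mod r 2 ≠ 0 then acc ++ [p] else acc),
          ih (p*2) (PySem.Int.floordiv r 2)
            (if PySem.Int.mod r 2 ≠ 0 then ([]:List Int) ++ [p] else [])]
      split <;> simp
    · simp [bLoop, h]

-- B's loop computes the LSB-first bits (invariant: r = n // p)
theorem bLoop_eq (n : Int) (hn : 0 ≤ n) : ∀ (m : Nat) (f : Nat) (p r : Int),
    0 < p → r = PySem.Int.floordiv n p → r < 2^(m+1) → m < f →
    bLoop n f p r [] = ascBits m p r := by
  intro m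
  induction m with
  | zero =>
    intro f p r hp hr h2 hf
    obtain ⟨f', rfl⟩ : ∃ f', f = f' + 1 := ⟨f - 1, by omega⟩
    have h2' : r < 2 := by norm_num at h2; omega
    rw [PySem.Int.floordiv_eq_ediv_of_pos hp] at hr
    have h0r : 0 ≤ r := hr ▸ Int.ediv_nonneg hn (le_of_lt hp)
    by_cases h : p ≤ n
    · have hr1 : r = 1 := by
        have : 1 ≤ r := by rw [hr]; exact (Int.le_ediv_iff_mul_le hp).mpr (by omega)
        omega
      simp only [bLoop, if_pos h]
      rw [bLoop_acc]
      have hmod : PySem.Int.mod r 2 ≠ 0 := by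
        rw [PySem.Int.mod_eq_emod_of_pos pvTwoPos, hr1]; decide
      rw [if_pos hmod]
      have hstop : bLoop n f' (p * 2) (PySem.Int.floordiv r 2) [] = [] := by
        cases f' with
        | zero => simp [bLoop]
        | succ f'' =>
          have hnp : ¬ (p * 2 ≤ n) := by
            intro hle
            have : 2 ≤ n / p := (Int.le_ediv_iff_mul_le hp).mpr (by omega)
            omega
          simp [bLoop, hnp]
      rw [hstop]
      simp only [ascBits, if_pos hmod]
      simp
    · have hr0 : r = 0 := by
        have : n / p < 1 := (Int.ediv_lt_iff_lt_mul hp).mpr (by omega)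
        omega
      simp only [bLoop, if_neg h]
      rw [hr0, ascBits_zero]
  | succ m ih =>
    intro f p r hp hr hlt hf
    obtain ⟨f', rfl⟩ : ∃ f', f = f' + 1 := ⟨f - 1, by omega⟩
    have hb : (2:Int)^(m+1+1) = 2^(m+1) * 2 := pow_succ 2 (m+1)
    rw [PySem.Int.floordiv_eq_ediv_of_pos hp] at hr
    have h0r : 0 ≤ r := hr ▸ Int.ediv_nonneg hn (le_of_lt hp)
    by_cases h : p ≤ n
    · simp only [bLoop, if_pos h]
      rw [bLoop_acc]
      have hinv : PySem.Int.floordiv r 2 = PySem.Int.floordiv n (p * 2) := by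
        rw [PySem.Int.floordiv_eq_ediv_of_pos pvTwoPos,
          PySem.Int.floordiv_eq_ediv_of_pos (by omega : (0:Int) < p * 2), hr]
        rw [Int.ediv_ediv_of_nonneg (by omega : (0:Int) ≤ p)]
      have hrec := ih f' (p * 2) (PySem.Int.floordiv r 2) (by omega) hinv
        (by rw [PySem.Int.floordiv_eq_ediv_of_pos pvTwoPos]; omega) (by omega)
      rw [hrec]
      rw [show ascBits (m+1) p r = (if PySem.Int.mod r 2 ≠ 0 then [p] else [])
          ++ ascBits m (p * 2) (PySem.Int.floordiv r 2) from rfl]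
      split <;> simp
    · have hr0 : r = 0 := by
        have : n / p < 1 := (Int.ediv_lt_iff_lt_mul hp).mpr (by omega)
        omega
      simp only [bLoop, if_neg h]
      rw [hr0, ascBits_zero]

-- B's value for 1 ≤ n, with 2^m ≤ n < 2^(m+1)
theorem B_eq (n : Int) (m : Nat) (h1 : (2:Int)^m ≤ n) (h2 : n < 2^(m+1)) :
    Sum_pow2_alt n = descS m 1 n := by
  have hmn : (m:Int) < n := by
    have h := Nat.lt_two_pow_self (n := m)
    have : (m:Int) < 2^m := by exact_mod_cast h
    omega
  show (bLoop n (n.toNat + 1) 1 n []).reverse = _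
  rw [bLoop_eq n (by omega) m (n.toNat + 1) 1 n (by norm_num)
      (by rw [PySem.Int.floordiv_eq_ediv_of_pos (by norm_num : (0:Int) < 1)]; simp)
      h2 (by omega)]
  exact rev_ascBits m 1 n

theorem nonpos_case (n : Int) (hn : n ≤ 0) : Sum_pow2 n = Sum_pow2_alt n := by
  have hA : Sum_pow2 n = [] := by
    show pyOuterA n _ (n.toNat + 1) 0 [] = []
    rw [show n.toNat + 1 = 0 + 1 from by omega, pyOuterA]
    rw [if_neg (by omega : ¬ ((0:Int) < n))]
  have hB : Sum_pow2_alt n = [] := by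
    show (bLoop n (n.toNat + 1) 1 n []).reverse = []
    rw [show n.toNat + 1 = 0 + 1 from by omega, bLoop]
    rw [if_neg (by omega : ¬ ((1:Int) ≤ n))]
    rfl
  rw [hA, hB]

theorem exists_log (n : Int) (hn : 1 ≤ n) : ∃ m : Nat, (2:Int)^m ≤ n ∧ n < 2^(m+1) := by
  refine ⟨Nat.log2 n.toNat, ?_, ?_⟩
  · have h := Nat.log2_self_le (n := n.toNat) (by omega)
    have h' : ((2 ^ Nat.log2 n.toNat : Nat) : Int) ≤ (n.toNat : Int) := by exact_mod_cast h
    push_cast at h'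
    omega
  · have h := Nat.lt_log2_self (n := n.toNat)
    have h' : ((n.toNat : Nat) : Int) < ((2 ^ (Nat.log2 n.toNat + 1) : Nat) : Int) := by
      exact_mod_cast h
    push_cast at h'
    omega

-- ===== VERDICT (by name: the statement is the Claim_ definition above) =====
theorem Sum_pow2_spec : Claim_equal_Sum_pow2 := by
  intro n _
  unfold Spec_Sum_pow2
  by_cases hn : 1 ≤ n
  · obtain ⟨m, h1, h2⟩ := exists_log n hn
    rw [A_eq n m h1 h2, B_eq n m h1 h2]
  · exact nonpos_case n (by omega)
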